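-- pv_equiv track=rewrite | github.com/NaveenkumarMD/3-month-prepartion-kit-hackerrank | Week_6/Magic square.py | magicSqaure
-- ===== SOURCE A (Python) =====
-- import math
--
-- def magicSqaure(arr):
--     pre = [
--             [[8, 1, 6], [3, 5, 7], [4, 9, 2]],
--             [[6, 1, 8], [7, 5, 3], [2, 9, 4]],
--             [[4, 9, 2], [3, 5, 7], [8, 1, 6]],
--             [[2, 9, 4], [7, 5, 3], [6, 1, 8]],
--             [[8, 3, 4], [1, 5, 9], [6, 7, 2]],
--             [[4, 3, 8], [9, 5, 1], [2, 7, 6]],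
--             [[6, 7, 2], [1, 5, 9], [8, 3, 4]],
--             [[2, 7, 6], [9, 5, 1], [4, 3, 8]],
--         ]
--     min=float(math.inf)
--     for k in range(8):
--
--         value=0
--         for i in range(3):
--             for j in range(3):
--                 value+=abs(arr[i][j]-pre[k][i][j])
--         if value<min:
--             min=value
--     return (min)
-- ===== SOURCE B (Python) =====
-- def magicSqaure(arr):
--     # Derive the magic squares from the constraints instead of hardcoding them:
--     # a 3x3 magic square is fully determined by its top-left t and top-middle m
--     # (center must be 5, all lines sum to 15); keep the (t, m) choices whose
--     # derived cells are exactly the digits 1..9.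
--     squares = []
--     for t in range(1, 10):
--         for m in range(1, 10):
--             cells = [t, m, 15 - t - m,
--                      20 - 2 * t - m, 5, 2 * t + m - 10,
--                      t + m - 5, 10 - m, 10 - t]
--             if sorted(cells) == list(range(1, 10)):
--                 squares.append(cells)
--     flat = [arr[i][j] for i in range(3) for j in range(3)]
--     return min(sum(abs(x - y) for x, y in zip(flat, s)) for s in squares)
-- ===== Notes on version B (the rewrite author's own statement) =====
-- stated objective: alternative
-- what changed: B does not hardcode the 8 magic squares: it searches the 81 (top-left, top-middle) choices, derives the remaining seven cells from the line-sum-15 constraints, keeps the choices whose cells are exactly the digits 1..9, and takes min over the cost sums of the discovered squares.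
import Mathlib
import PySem

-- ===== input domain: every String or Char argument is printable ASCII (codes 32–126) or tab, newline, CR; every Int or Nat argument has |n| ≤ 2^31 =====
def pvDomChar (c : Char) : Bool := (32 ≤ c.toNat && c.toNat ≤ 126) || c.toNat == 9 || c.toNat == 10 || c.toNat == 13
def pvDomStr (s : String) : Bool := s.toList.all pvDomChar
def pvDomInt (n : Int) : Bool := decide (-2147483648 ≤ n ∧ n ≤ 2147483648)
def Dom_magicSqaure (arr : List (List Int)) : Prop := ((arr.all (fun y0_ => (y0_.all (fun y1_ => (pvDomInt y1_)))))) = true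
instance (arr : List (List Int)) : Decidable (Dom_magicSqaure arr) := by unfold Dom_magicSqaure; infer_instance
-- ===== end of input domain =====

-- B derives the magic squares from the line-sum constraints (a 3x3 magic square is
-- determined by its top-left and top-middle cells) instead of hardcoding all 8; same minimum.

-- ===== PORT A =====
-- literal transliteration: running min starts at float('inf'), ported as Option Int (none = inf);
-- arr[i][j] is pyGet? (IndexError = none, excluded by Pre_; .getD 0 is never reached under Pre_)
def magicSqaure (arr : List (List Int)) : Int :=
  let pre : List (List (List Int)) :=
    [ [[8, 1, 6], [3, 5, 7], [4, 9, 2]],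
      [[6, 1, 8], [7, 5, 3], [2, 9, 4]],
      [[4, 9, 2], [3, 5, 7], [8, 1, 6]],
      [[2, 9, 4], [7, 5, 3], [6, 1, 8]],
      [[8, 3, 4], [1, 5, 9], [6, 7, 2]],
      [[4, 3, 8], [9, 5, 1], [2, 7, 6]],
      [[6, 7, 2], [1, 5, 9], [8, 3, 4]],
      [[2, 7, 6], [9, 5, 1], [4, 3, 8]] ]
  let mn :=
    (PySem.List.pyRange 0 8 1).foldl (fun (mn : Option Int) k =>
      let value :=
        (PySem.List.pyRange 0 3 1).foldl (fun v i =>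
          (PySem.List.pyRange 0 3 1).foldl (fun v j =>
            v + |(PySem.List.pyGet? ((PySem.List.pyGet? arr i).getD []) j).getD 0 -
                 (PySem.List.pyGet? ((PySem.List.pyGet? ((PySem.List.pyGet? pre k).getD []) i).getD []) j).getD 0|) v) 0
      match mn with
      | none => some value                       -- value < inf is always true
      | some m => if value < m then some value else some m) none
  mn.getD 0

-- ===== PORT B =====
-- the nine cells forced by the magic constraints once the top-left t and top-middle m are chosen
def pvCells (t m : Int) : List Int :=
  [t, m, 15 - t - m, 20 - 2 * t - m, 5, 2 * t + m - 10, t + m - 5, 10 - m, 10 - t]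

-- exact port of Source B: build squares by the double loop with the sorted == range(1,10) test,
-- read the 3x3 window with pyGet? (IndexError excluded by Pre_), then min over the cost sums
def magicSqaure_alt (arr : List (List Int)) : Int :=
  let squares : List (List Int) :=
    (PySem.List.pyRange 1 10 1).foldl (fun sq t =>
      (PySem.List.pyRange 1 10 1).foldl (fun sq m =>
        let cells := pvCells t m
        if PySem.List.sorted cells (fun x => x) false = PySem.List.pyRange 1 10 1 then
          sq ++ [cells]
        else sq) sq) []
  let flat : List Int :=
    (PySem.List.pyRange 0 3 1).flatMap (fun i =>
      (PySem.List.pyRange 0 3 1).map (fun j =>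
        (PySem.List.pyGet? ((PySem.List.pyGet? arr i).getD []) j).getD 0))
  (PySem.List.min? (squares.map (fun s =>
      (flat.zip s).foldl (fun a p => a + |p.1 - p.2|) 0)) (fun x => x)).getD 0

-- ===== PRECONDITION & SPEC =====
-- A raises IndexError unless arr has at least 3 rows whose first three each have at least 3 entries
def Pre_magicSqaure (arr : List (List Int)) : Prop :=
  3 ≤ arr.length ∧ ∀ r ∈ arr.take 3, 3 ≤ r.length
instance (arr : List (List Int)) : Decidable (Pre_magicSqaure arr) := by
  unfold Pre_magicSqaure; infer_instance
def pvWitness_magicSqaure : List (List Int) := [[1, 2, 3], [4, 5, 6], [7, 8, 9]]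

def Spec_magicSqaure (arr : List (List Int)) (out : Int) : Prop := out = magicSqaure_alt arr
instance (arr : List (List Int)) (out : Int) : Decidable (Spec_magicSqaure arr out) := by
  unfold Spec_magicSqaure; infer_instance

-- ===== CLAIM =====
def Claim_equal_magicSqaure : Prop :=
  ∀ (arr : List (List Int)), Dom_magicSqaure arr → Pre_magicSqaure arr →
    Spec_magicSqaure arr (magicSqaure arr)

-- ===== LEMMAS AND PROOFS =====
theorem pyGet?_at1 {α : Type} (x0 x1 : α) (xs : List α) :
    PySem.List.pyGet? (x0 :: x1 :: xs) 1 = some x1 := by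
  simp [PySem.List.pyGet?, PySem.List.pyIdx?]

theorem pyGet?_at2 {α : Type} (x0 x1 x2 : α) (xs : List α) :
    PySem.List.pyGet? (x0 :: x1 :: x2 :: xs) 2 = some x2 := by
  have h : (2:Int) ≤ (xs.length : Int) + 1 + 1 := by omega
  simp [PySem.List.pyGet?, PySem.List.pyIdx?, h]


theorem pyGet?_at0 {α : Type} (x0 : α) (xs : List α) :
    PySem.List.pyGet? (x0 :: xs) 0 = some x0 := by
  simp [PySem.List.pyGet?, PySem.List.pyIdx?]

theorem pyGet8_3 {α : Type} (x0 x1 x2 x3 x4 x5 x6 x7 : α) :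
    PySem.List.pyGet? [x0, x1, x2, x3, x4, x5, x6, x7] 3 = some x3 := by
  simp [PySem.List.pyGet?, PySem.List.pyIdx?]

theorem pyGet8_4 {α : Type} (x0 x1 x2 x3 x4 x5 x6 x7 : α) :
    PySem.List.pyGet? [x0, x1, x2, x3, x4, x5, x6, x7] 4 = some x4 := by
  simp [PySem.List.pyGet?, PySem.List.pyIdx?]

theorem pyGet8_5 {α : Type} (x0 x1 x2 x3 x4 x5 x6 x7 : α) :
    PySem.List.pyGet? [x0, x1, x2, x3, x4, x5, x6, x7] 5 = some x5 := by
  simp [PySem.List.pyGet?, PySem.List.pyIdx?]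

theorem pyGet8_6 {α : Type} (x0 x1 x2 x3 x4 x5 x6 x7 : α) :
    PySem.List.pyGet? [x0, x1, x2, x3, x4, x5, x6, x7] 6 = some x6 := by
  simp [PySem.List.pyGet?, PySem.List.pyIdx?]

theorem pyGet8_7 {α : Type} (x0 x1 x2 x3 x4 x5 x6 x7 : α) :
    PySem.List.pyGet? [x0, x1, x2, x3, x4, x5, x6, x7] 7 = some x7 := by
  simp [PySem.List.pyGet?, PySem.List.pyIdx?]

-- the constraint search finds exactly these eight squares (closed evaluation)
theorem pvSquares_eval :
    (PySem.List.pyRange 1 10 1).foldl (fun sq t =>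
      (PySem.List.pyRange 1 10 1).foldl (fun sq m =>
        let cells := pvCells t m
        if PySem.List.sorted cells (fun x => x) false = PySem.List.pyRange 1 10 1 then
          sq ++ [cells]
        else sq) sq) ([] : List (List Int)) =
    [ [2, 7, 6, 9, 5, 1, 4, 3, 8],
      [2, 9, 4, 7, 5, 3, 6, 1, 8],
      [4, 3, 8, 9, 5, 1, 2, 7, 6],
      [4, 9, 2, 3, 5, 7, 8, 1, 6],
      [6, 1, 8, 7, 5, 3, 2, 9, 4],
      [6, 7, 2, 1, 5, 9, 8, 3, 4],
      [8, 1, 6, 3, 5, 7, 4, 9, 2],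
      [8, 3, 4, 1, 5, 9, 6, 7, 2] ] := by decide

theorem ite_lt_some (a b : Int) : (if a < b then (some a) else (some b)) = some (min b a) := by
  by_cases h : a < b
  · simp [h, min_eq_right h.le]
  · simp [h, min_eq_left (by omega : b ≤ a)]

set_option maxHeartbeats 2000000 in
theorem magicSqaure_eq_alt (arr : List (List Int)) (h : Pre_magicSqaure arr) :
    magicSqaure arr = magicSqaure_alt arr := by
  obtain ⟨hlen, hrows⟩ := h
  match arr, hlen with
  | r0 :: r1 :: r2 :: rest, _ =>
    have h0 := hrows r0 (by simp)
    have h1 := hrows r1 (by simp)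
    have h2 := hrows r2 (by simp)
    match r0, h0 with
    | a :: b :: c :: t0, _ =>
      match r1, h1 with
      | d :: e :: f :: t1, _ =>
        match r2, h2 with
        | g :: i :: j :: t2, _ =>
          have hr8 : PySem.List.pyRange 0 8 1 = [0, 1, 2, 3, 4, 5, 6, 7] := by decide
          have hr3 : PySem.List.pyRange 0 3 1 = [0, 1, 2] := by decide
          simp only [magicSqaure, magicSqaure_alt, pvSquares_eval, hr8, hr3]
          simp only [List.foldl_cons, List.foldl_nil, List.flatMap_cons,
            List.flatMap_nil, List.map_cons, List.map_nil, List.cons_append,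
            List.nil_append, List.append_nil, List.zip_cons_cons, List.zip_nil_right,
            Option.getD_some, zero_add, pyGet?_at0, pyGet?_at1, pyGet?_at2,
            pyGet8_3, pyGet8_4, pyGet8_5, pyGet8_6, pyGet8_7,
            ite_lt_some, PySem.List.min?_id_cons]
          generalize |a - 2| = pva2
          generalize |a - 4| = pva4
          generalize |a - 6| = pva6
          generalize |a - 8| = pva8
          generalize |b - 1| = pvb1
          generalize |b - 3| = pvb3
          generalize |b - 7| = pvb7
          generalize |b - 9| = pvb9
          generalize |c - 2| = pvc2
          generalize |c - 4| = pvc4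
          generalize |c - 6| = pvc6
          generalize |c - 8| = pvc8
          generalize |d - 1| = pvd1
          generalize |d - 3| = pvd3
          generalize |d - 7| = pvd7
          generalize |d - 9| = pvd9
          generalize |e - 5| = pve5
          generalize |f - 1| = pvf1
          generalize |f - 3| = pvf3
          generalize |f - 7| = pvf7
          generalize |f - 9| = pvf9
          generalize |g - 2| = pvg2
          generalize |g - 4| = pvg4
          generalize |g - 6| = pvg6
          generalize |g - 8| = pvg8
          generalize |i - 1| = pvi1
          generalize |i - 3| = pvi3
          generalize |i - 7| = pvi7
          generalize |i - 9| = pvi9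
          generalize |j - 2| = pvj2
          generalize |j - 4| = pvj4
          generalize |j - 6| = pvj6
          generalize |j - 8| = pvj8
          ac_rfl

-- ===== VERDICT =====
theorem magicSqaure_spec : Claim_equal_magicSqaure := by
  intro arr _ hpre
  exact magicSqaure_eq_alt arr hpre
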